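-- pv_equiv track=rewrite | github.com/BerndBauerochse/dav-ticket-system | app/app.py | extract_audible_link
-- ===== SOURCE A (Python) =====
-- def extract_audible_link(metadata):
--     if not metadata:
--         return ""
--
--     prioritized_values = []
--     fallback_values = []
--
--     for key, value in metadata.items():
--         if value is None:
--             continue
--
--         text = str(value).strip()
--         if not text or not text.lower().startswith(("http://", "https://")):
--             continue
--
--         lowered_key = str(key).lower()
--         lowered_value = text.lower()
--         if "audible" not in lowered_value:
--             continue
--
--         if "audible" in lowered_key and any(token in lowered_key for token in ("link", "url", "href")):
--             prioritized_values.append(text)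
--         else:
--             fallback_values.append(text)
--
--     return prioritized_values[0] if prioritized_values else (fallback_values[0] if fallback_values else "")
-- ===== SOURCE B (Python) =====
-- def extract_audible_link(metadata):
--     if not metadata:
--         return ""
--
--     def valid_text(value):
--         if value is None:
--             return None
--         text = str(value).strip()
--         low = text.lower()
--         if text and (low.startswith("http://") or low.startswith("https://")) and "audible" in low:
--             return text
--         return None
--
--     def prioritized(key):
--         k = str(key).lower()
--         return "audible" in k and ("link" in k or "url" in k or "href" in k)
--
--     # First pass: return the first valid text under a prioritized key.
--     for key, value in metadata.items():
--         text = valid_text(value)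
--         if text is not None and prioritized(key):
--             return text
--     # Second pass: no prioritized entry exists, so the first valid text wins.
--     for key, value in metadata.items():
--         text = valid_text(value)
--         if text is not None:
--             return text
--     return ""
-- ===== Notes on version B (the rewrite author's own statement) =====
-- stated objective: alternative
-- what changed: Replaces the single accumulate-two-lists loop with two early-returning scans over a shared validity helper: pass 1 returns the first valid text under a prioritized key, pass 2 the first valid text at all.
import Mathlib
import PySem

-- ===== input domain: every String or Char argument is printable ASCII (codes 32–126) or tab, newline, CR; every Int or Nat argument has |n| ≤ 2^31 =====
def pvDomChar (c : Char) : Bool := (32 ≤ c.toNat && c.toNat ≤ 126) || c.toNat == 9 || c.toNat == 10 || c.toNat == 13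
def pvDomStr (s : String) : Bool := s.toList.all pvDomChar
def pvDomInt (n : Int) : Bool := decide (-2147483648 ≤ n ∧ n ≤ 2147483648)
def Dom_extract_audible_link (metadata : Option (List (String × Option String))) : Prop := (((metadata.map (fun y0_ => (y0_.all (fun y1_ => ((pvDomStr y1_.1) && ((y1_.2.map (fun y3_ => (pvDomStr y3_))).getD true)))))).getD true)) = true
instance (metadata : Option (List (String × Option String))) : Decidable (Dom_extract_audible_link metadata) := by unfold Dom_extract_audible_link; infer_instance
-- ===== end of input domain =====

-- B replaces A's single accumulate-two-lists loop by two early-returning scans over a shared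
-- validity helper (alternative decomposition, same O(n) cost).

-- ===== PORT A =====
-- A's loop body: collect valid texts into (prioritized, fallback) lists, appending at the back.
def pvStepA (acc : List String × List String) (kv : String × Option String) : List String × List String :=
  match kv.2 with
  | none => acc
  | some v =>
    let text := PySem.Str.strip v
    if text == "" || !(PySem.Str.startswith (PySem.Str.lower text) "http://" || PySem.Str.startswith (PySem.Str.lower text) "https://") then acc
    else
      let lowered_key := PySem.Str.lower kv.1
      let lowered_value := PySem.Str.lower text
      if !(PySem.Str.isIn "audible" lowered_value) then acc
      else if PySem.Str.isIn "audible" lowered_key && (PySem.Str.isIn "link" lowered_key || PySem.Str.isIn "url" lowered_key || PySem.Str.isIn "href" lowered_key)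
      then (acc.1 ++ [text], acc.2)
      else (acc.1, acc.2 ++ [text])

def extract_audible_link (metadata : Option (List (String × Option String))) : String :=
  match metadata with
  | none => ""
  | some items =>
    if items.isEmpty then ""
    else
      let r := items.foldl pvStepA ([], [])
      match r.1 with
      | t :: _ => t
      | [] =>
        match r.2 with
        | t :: _ => t
        | [] => ""

-- ===== PORT B =====
-- shared validity helper (Source B's valid_text)
def pvValidText (value : Option String) : Option String :=
  match value with
  | none => none
  | some v =>
    let text := PySem.Str.strip v
    let low := PySem.Str.lower text
    if !(text == "") && (PySem.Str.startswith low "http://" || PySem.Str.startswith low "https://") && PySem.Str.isIn "audible" low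
    then some text else none

-- Source B's prioritized(key)
def pvPrioritized (key : String) : Bool :=
  let k := PySem.Str.lower key
  PySem.Str.isIn "audible" k && (PySem.Str.isIn "link" k || PySem.Str.isIn "url" k || PySem.Str.isIn "href" k)

def extract_audible_link_alt (metadata : Option (List (String × Option String))) : String :=
  match metadata with
  | none => ""
  | some items =>
    if items.isEmpty then ""
    else
      -- first pass: first valid text under a prioritized key
      match items.findSome? (fun kv =>
          match pvValidText kv.2 with
          | some t => if pvPrioritized kv.1 then some t else none
          | none => none) with
      | some t => t
      | none =>
        -- second pass: first valid text at all
        match items.findSome? (fun kv => pvValidText kv.2) with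
        | some t => t
        | none => ""

-- ===== PRECONDITION & SPEC =====
def Spec_extract_audible_link (metadata : Option (List (String × Option String))) (out : String) : Prop := out = extract_audible_link_alt metadata
instance (metadata : Option (List (String × Option String))) (out : String) : Decidable (Spec_extract_audible_link metadata out) := by unfold Spec_extract_audible_link; infer_instance

-- ===== CLAIM (what is proved, stated in full; the proofs are below) =====
def Claim_equal_extract_audible_link : Prop := ∀ (metadata : Option (List (String × Option String))), Dom_extract_audible_link metadata → Spec_extract_audible_link metadata (extract_audible_link metadata)

-- ===== LEMMAS AND PROOFS =====

-- the two selectors used in the analysis of A's loop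
def pvPrioPick (kv : String × Option String) : Option String :=
  match pvValidText kv.2 with
  | some t => if pvPrioritized kv.1 then some t else none
  | none => none

def pvFbPick (kv : String × Option String) : Option String :=
  match pvValidText kv.2 with
  | some t => if pvPrioritized kv.1 then none else some t
  | none => none

theorem pvStepA_eq (acc : List String × List String) (kv : String × Option String) :
    pvStepA acc kv = (acc.1 ++ (pvPrioPick kv).toList, acc.2 ++ (pvFbPick kv).toList) := by
  rcases kv with ⟨k, v⟩
  cases v with
  | none => simp [pvStepA, pvPrioPick, pvFbPick, pvValidText]
  | some s =>
    simp only [pvStepA, pvPrioPick, pvFbPick, pvValidText, pvPrioritized]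
    split_ifs <;> simp_all

theorem pvFoldlA (l : List (String × Option String)) (p f : List String) :
    l.foldl pvStepA (p, f) = (p ++ l.filterMap pvPrioPick, f ++ l.filterMap pvFbPick) := by
  induction l generalizing p f with
  | nil => simp
  | cons kv t ih =>
    rw [List.foldl_cons, pvStepA_eq, ih]
    cases hp : pvPrioPick kv <;> cases hf : pvFbPick kv <;> simp [hp, hf]

-- ===== VERDICT (by name: the statement is the Claim_ definition above) =====
theorem extract_audible_link_spec : Claim_equal_extract_audible_link := by
  intro metadata _
  unfold Spec_extract_audible_link extract_audible_link extract_audible_link_alt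
  cases metadata with
  | none => rfl
  | some items =>
    by_cases he : items.isEmpty
    · simp [he]
    · simp only [he]
      rw [pvFoldlA]
      rw [show (items.findSome? fun kv =>
            match pvValidText kv.2 with
            | some t => if pvPrioritized kv.1 then some t else none
            | none => none) = items.findSome? pvPrioPick from rfl]
      rw [← List.head?_filterMap, ← List.head?_filterMap]
      cases hp : items.filterMap pvPrioPick with
      | cons t ts => simp
      | nil =>
        have hnone : ∀ kv ∈ items, pvPrioPick kv = none := List.filterMap_eq_nil_iff.mp hp
        have hcong : items.filterMap pvFbPick = items.filterMap (fun kv => pvValidText kv.2) := by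
          apply List.filterMap_congr
          intro kv hkv
          have h1 := hnone kv hkv
          unfold pvPrioPick at h1
          unfold pvFbPick
          cases hv : pvValidText kv.2 with
          | none => simp
          | some t =>
            rw [hv] at h1
            cases hpr : pvPrioritized kv.1 with
            | true => rw [hpr] at h1; simp at h1
            | false => simp
        rw [hcong]
        cases items.filterMap (fun kv => pvValidText kv.2) <;> simp
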